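-- pv_equiv track=rewrite | github.com/sthwalo/pdf_statement_reader | modules/data_cleaner.py | ensure_balance_columns
-- ===== SOURCE A (Python) =====
-- def ensure_balance_columns(transactions, debug=False):
--     """
--     Ensure balance columns are properly populated across all pages
--
--     Args:
--         transactions (list): List of transaction dictionaries
--         debug (bool): Enable debug mode
--
--     Returns:
--         list: Transactions with properly populated balance columns
--         dict: Debug info if debug=True
--     """
--     if not transactions:
--         return transactions
--
--     debug_info = {
--         'balance_columns_fixed': 0,
--         'balance_values_found': 0
--     }
--
--     # Find transactions with balance values
--     transactions_with_balance = [tx for tx in transactions if tx.get('Balance')]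
--     debug_info['balance_values_found'] = len(transactions_with_balance)
--
--     # If we have some transactions with balance values, use them to help identify balance columns
--     if transactions_with_balance:
--         # Group transactions by date to help with balance propagation
--         date_groups = {}
--         for i, tx in enumerate(transactions):
--             date = tx.get('Date', '')
--             if date:
--                 if date not in date_groups:
--                     date_groups[date] = []
--                 date_groups[date].append(i)
--
--         # For each date group, if any transaction has a balance, try to identify the balance column
--         for date, indices in date_groups.items():
--             # Find transactions with balance in this date group
--             balance_indices = [i for i in indices if transactions[i].get('Balance')]
--
--             # If we have balance values for this date, propagate to other transactions on same date
--             if balance_indices: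
--                 for i in indices:
--                     if not transactions[i].get('Balance') and i not in balance_indices:
--                         # Use the balance from the last transaction with balance for this date
--                         last_balance_idx = balance_indices[-1]
--                         transactions[i]['Balance'] = transactions[last_balance_idx].get('Balance', '')
--                         debug_info['balance_columns_fixed'] += 1
--
--     if debug:
--         return transactions, debug_info
--     return transactions
-- ===== SOURCE B (Python) =====
-- def ensure_balance_columns(transactions, debug=False):
--     """Propagate balance values across same-date transactions.
--
--     Single flat pass building a date -> last-balance-value dict, then one
--     flat fill pass (no per-date grouping of indices). Mutates the
--     transaction dicts in place, like the original.
--     """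
--     if not transactions:
--         return transactions
--
--     last_balance = {}
--     balance_values_found = 0
--     for tx in transactions:
--         if tx.get('Balance'):
--             balance_values_found += 1
--             date = tx.get('Date', '')
--             if date:
--                 last_balance[date] = tx['Balance']
--
--     balance_columns_fixed = 0
--     for tx in transactions:
--         if not tx.get('Balance'):
--             date = tx.get('Date', '')
--             if date and date in last_balance:
--                 tx['Balance'] = last_balance[date]
--                 balance_columns_fixed += 1
--
--     if debug:
--         return transactions, {
--             'balance_columns_fixed': balance_columns_fixed,
--             'balance_values_found': balance_values_found,
--         }
--     return transactions
-- ===== Notes on version B (the rewrite author's own statement) =====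
-- stated objective: simpler
-- what changed: A builds a date->list-of-indices dict and runs a nested per-group fold that re-scans each group for balance indices and patches rows by index; B makes two flat passes: one building a date->last-balance-value dict, then one direct fill pass over the rows, with no index lists, no per-group rescans and no list indexing. B reproduces A exactly, including the documented debug=True (list, debug-dict) tuple; …
import Mathlib
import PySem

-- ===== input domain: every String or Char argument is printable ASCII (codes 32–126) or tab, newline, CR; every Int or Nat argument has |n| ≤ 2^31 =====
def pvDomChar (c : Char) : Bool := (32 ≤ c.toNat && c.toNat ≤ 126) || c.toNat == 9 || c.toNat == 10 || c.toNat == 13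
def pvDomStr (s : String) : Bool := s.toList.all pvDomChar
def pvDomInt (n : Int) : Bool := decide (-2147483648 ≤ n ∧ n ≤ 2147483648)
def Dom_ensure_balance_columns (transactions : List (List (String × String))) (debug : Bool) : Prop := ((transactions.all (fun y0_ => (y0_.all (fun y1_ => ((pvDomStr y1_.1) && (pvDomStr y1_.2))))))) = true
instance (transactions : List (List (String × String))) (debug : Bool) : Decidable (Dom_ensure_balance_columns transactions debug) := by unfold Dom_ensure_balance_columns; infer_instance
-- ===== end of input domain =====

-- B replaces A's per-date grouping of index lists (and nested per-group index folds) by two flat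
-- passes over the rows via a date→last-balance dict (objective: simpler).  B's Python reproduces
-- A exactly on EVERY input, including the documented debug=True (list, debug-dict) tuple; both
-- mutate the transaction dicts in place identically, and the equivalence proved here is about the
-- return value.  Pre_ below excludes debug=True on nonempty input ONLY because that tuple return
-- has no encoding in this file's required return type List (List (String × String)) — a port-type
-- limitation, not a behaviour B declines to match (the debug counters feed only that tuple, so
-- the ports omit them).

-- ===== PORT A =====
-- tx.get(k, '') on a row dict
def pvGet (tx : List (String × String)) (k : String) : String := (PySem.Dict.mk tx).getD k ""

def ensure_balance_columns (transactions : List (List (String × String))) (debug : Bool) : List (List (String × String)) :=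
  if transactions = [] then transactions
  else
    -- transactions_with_balance = [tx for tx in transactions if tx.get('Balance')]
    let transactions_with_balance := transactions.filter (fun tx => pvGet tx "Balance" ≠ "")
    if transactions_with_balance ≠ [] then
      -- date_groups: for i, tx in enumerate(transactions): if date: date_groups.setdefault(date, []).append(i)
      let date_groups : PySem.Dict String (List Int) :=
        (PySem.List.enumerate transactions 0).foldl
          (fun g p => if pvGet p.2 "Date" ≠ "" then g.modify (pvGet p.2 "Date") [] (· ++ [p.1]) else g)
          PySem.Dict.empty
      -- for date, indices in date_groups.items(): …
      date_groups.items.foldl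
        (fun cur p =>
          let balance_indices := p.2.filter (fun i => pvGet (PySem.List.pyGetD cur i []) "Balance" ≠ "")
          if balance_indices ≠ [] then
            p.2.foldl
              (fun cur2 i =>
                if pvGet (PySem.List.pyGetD cur2 i []) "Balance" = "" ∧ i ∉ balance_indices then
                  -- transactions[i]['Balance'] = transactions[balance_indices[-1]].get('Balance', '')
                  PySem.List.pySetD cur2 i
                    (((PySem.Dict.mk (PySem.List.pyGetD cur2 i [])).insert "Balance"
                        (pvGet (PySem.List.pyGetD cur2 (PySem.List.pyGetD balance_indices (-1) 0) []) "Balance")).items)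
                else cur2)
              cur
          else cur)
        transactions
    else transactions

-- ===== PORT B =====
def ensure_balance_columns_alt (transactions : List (List (String × String))) (debug : Bool) : List (List (String × String)) :=
  if transactions = [] then transactions
  else
    -- pass 1: last_balance[date] = tx['Balance'] for every row with truthy Balance and Date
    let last_balance : PySem.Dict String String :=
      transactions.foldl
        (fun lb tx =>
          if pvGet tx "Balance" ≠ "" then
            (if pvGet tx "Date" ≠ "" then lb.insert (pvGet tx "Date") (pvGet tx "Balance") else lb)
          else lb)
        PySem.Dict.empty
    -- pass 2: fill each row with empty Balance whose date is in last_balance (in-place per-row update)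
    transactions.map
      (fun tx =>
        if pvGet tx "Balance" = "" then
          if pvGet tx "Date" ≠ "" ∧ last_balance.contains (pvGet tx "Date") = true then
            ((PySem.Dict.mk tx).insert "Balance" (last_balance.getD (pvGet tx "Date") "")).items
          else tx
        else tx)
      

-- ===== PRECONDITION & SPEC =====
-- Pre_ excludes debug = true with a nonempty list: there Python A returns the documented
-- (transactions, debug_info) tuple, which B's Python reproduces identically but which has no
-- representation in the required Lean return type List (List (String × String)).
def Pre_ensure_balance_columns (transactions : List (List (String × String))) (debug : Bool) : Prop :=
  debug = false ∨ transactions = []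
instance (transactions : List (List (String × String))) (debug : Bool) : Decidable (Pre_ensure_balance_columns transactions debug) := by unfold Pre_ensure_balance_columns; infer_instance

def pvWitness_ensure_balance_columns : (List (List (String × String))) × Bool :=
  ([[("Date", "01/02"), ("Balance", "100.00")], [("Date", "01/02"), ("Description", "x")]], false)

def Spec_ensure_balance_columns (transactions : List (List (String × String))) (debug : Bool) (out : List (List (String × String))) : Prop := out = ensure_balance_columns_alt transactions debug
instance (transactions : List (List (String × String))) (debug : Bool) (out : List (List (String × String))) : Decidable (Spec_ensure_balance_columns transactions debug out) := by unfold Spec_ensure_balance_columns; infer_instance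

-- ===== CLAIM (what is proved, stated in full; the proofs are below) =====
def Claim_equal_ensure_balance_columns : Prop := ∀ (transactions : List (List (String × String))) (debug : Bool), Dom_ensure_balance_columns transactions debug → Pre_ensure_balance_columns transactions debug → Spec_ensure_balance_columns transactions debug (ensure_balance_columns transactions debug)

-- ===== LEMMAS AND PROOFS =====

-- ---- shared vocabulary of the proofs ----
abbrev pvTx : Type := List (String × String)

def pvBal (tx : pvTx) : String := pvGet tx "Balance"
def pvDate (tx : pvTx) : String := pvGet tx "Date"
def pvMatch (d : String) (tx : pvTx) : Bool := pvDate tx == d && !(pvBal tx == "")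
-- balance of the LAST transaction with date d and a truthy balance
def pvLastBal (txs : List pvTx) (d : String) : Option String :=
  ((txs.filter (pvMatch d)).getLast?).map pvBal
-- the common per-row result of both programs
def pvFill (txs : List pvTx) (tx : pvTx) : pvTx :=
  if pvBal tx = "" ∧ pvDate tx ≠ "" ∧ (pvLastBal txs (pvDate tx)).isSome then
    ((PySem.Dict.mk tx).insert "Balance" ((pvLastBal txs (pvDate tx)).getD "")).items
  else tx

-- ---- B-side ----
def pvStepB (lb : PySem.Dict String String) (tx : pvTx) : PySem.Dict String String :=
  if pvGet tx "Balance" ≠ "" then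
    (if pvGet tx "Date" ≠ "" then lb.insert (pvGet tx "Date") (pvGet tx "Balance") else lb)
  else lb

theorem pvLastBal_append (l : List pvTx) (tx : pvTx) (d : String) :
    pvLastBal (l ++ [tx]) d = if pvMatch d tx then some (pvBal tx) else pvLastBal l d := by
  unfold pvLastBal
  rw [List.filter_append]
  by_cases h : pvMatch d tx
  · simp [h]
  · simp [h]

theorem pvStepB_get? (tx : pvTx) (d : String) (hd : d ≠ "") (s : PySem.Dict String String) :
    (pvStepB s tx).get? d = if pvMatch d tx then some (pvBal tx) else s.get? d := by
  unfold pvStepB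
  by_cases hb : pvGet tx "Balance" ≠ ""
  · rw [if_pos hb]
    by_cases hdt : pvGet tx "Date" ≠ ""
    · rw [if_pos hdt]
      by_cases heq : pvGet tx "Date" = d
      · have hm : pvMatch d tx = true := by
          simp only [pvMatch, pvDate, pvBal, heq, beq_self_eq_true, Bool.true_and,
            Bool.not_eq_true']
          simpa using hb
        rw [heq, PySem.Dict.get?_insert_self, if_pos hm]
        simp [pvBal, heq]
      · have hm : ¬ pvMatch d tx = true := by
          simp only [pvMatch, pvDate, pvBal, Bool.and_eq_true, beq_iff_eq]
          intro hc; exact heq hc.1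
        rw [PySem.Dict.get?_insert_of_ne _ _ (fun h => heq h.symm), if_neg hm]
    · rw [if_neg hdt]
      simp only [ne_eq, not_not] at hdt
      have hm : ¬ pvMatch d tx = true := by
        simp only [pvMatch, pvDate, pvBal, Bool.and_eq_true, beq_iff_eq, hdt]
        intro hc; exact hd hc.1.symm
      rw [if_neg hm]
  · rw [if_neg hb]
    simp only [ne_eq, not_not] at hb
    have hm : ¬ pvMatch d tx = true := by
      simp [pvMatch, pvBal, hb]
    rw [if_neg hm]

theorem pvB_pass1 (txs : List pvTx) (d : String) (hd : d ≠ "") :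
    ∀ (acc : PySem.Dict String String),
    (txs.foldl pvStepB acc).get? d = ((pvLastBal txs d).or (acc.get? d)) := by
  induction txs using List.reverseRecOn with
  | nil => intro acc; simp [pvLastBal]
  | append_singleton l tx ih =>
    intro acc
    rw [List.foldl_append, List.foldl_cons, List.foldl_nil, pvLastBal_append,
      pvStepB_get? tx d hd, ih]
    by_cases hm : pvMatch d tx = true
    · simp [hm]
    · simp [hm]

theorem pvB_eq (txs : List pvTx) (debug : Bool) :
    ensure_balance_columns_alt txs debug = txs.map (pvFill txs) := by
  by_cases h0 : txs = []
  · simp [ensure_balance_columns_alt, h0]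
  · have hlb : ∀ dt : String, dt ≠ "" →
        (List.foldl (fun (lb : PySem.Dict String String) (tx : pvTx) =>
            if pvGet tx "Balance" ≠ "" then
              (if pvGet tx "Date" ≠ "" then lb.insert (pvGet tx "Date") (pvGet tx "Balance") else lb)
            else lb) PySem.Dict.empty txs).get? dt = pvLastBal txs dt := by
      intro dt h
      show (txs.foldl pvStepB PySem.Dict.empty).get? dt = pvLastBal txs dt
      rw [pvB_pass1 txs dt h]
      simp [PySem.Dict.get?_empty]
    simp only [ensure_balance_columns_alt, if_neg h0]
    apply List.map_congr_left
    intro tx _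
    show (if pvGet tx "Balance" = "" then _ else tx) = pvFill txs tx
    by_cases hb : pvGet tx "Balance" = ""
    · rw [if_pos hb]
      by_cases hdt : pvGet tx "Date" = ""
      · rw [if_neg (by simp [hdt])]
        simp [pvFill, pvDate, hdt]
      · have hget := hlb (pvGet tx "Date") hdt
        by_cases hs : (pvLastBal txs (pvGet tx "Date")).isSome = true
        · rw [if_pos ⟨hdt, by rw [PySem.Dict.contains_eq_isSome_get?, hget]; exact hs⟩]
          unfold pvFill
          rw [if_pos ⟨hb, hdt, hs⟩]
          rw [PySem.Dict.getD_eq_get?_getD, hget]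
          rfl
        · rw [if_neg (fun hc => hs (by rw [← hget, ← PySem.Dict.contains_eq_isSome_get?]; exact hc.2))]
          unfold pvFill
          rw [if_neg (fun hc => hs hc.2.2)]
    · rw [if_neg hb]
      unfold pvFill
      rw [if_neg (fun hc => hb hc.1)]

-- ---- A-side ----
def pvPairs (txs : List pvTx) : List (String × Int) :=
  (PySem.List.enumerate txs 0).filterMap
    (fun p => if pvGet p.2 "Date" ≠ "" then some (pvGet p.2 "Date", p.1) else none)

def pvDG (txs : List pvTx) : PySem.Dict String (List Int) :=
  (PySem.List.enumerate txs 0).foldl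
    (fun g p => if pvGet p.2 "Date" ≠ "" then g.modify (pvGet p.2 "Date") [] (· ++ [p.1]) else g)
    PySem.Dict.empty

def pvGrp (txs : List pvTx) (d : String) : List Int :=
  ((pvPairs txs).filter (fun q => q.1 == d)).map (·.2)

def pvEgrp (txs : List pvTx) (d : String) : List (Int × pvTx) :=
  (PySem.List.enumerate txs 0).filter (fun p => pvMatch d p.2)

def pvInner (bi : List Int) (cur2 : List pvTx) (i : Int) : List pvTx :=
  if pvGet (PySem.List.pyGetD cur2 i []) "Balance" = "" ∧ i ∉ bi then
    PySem.List.pySetD cur2 i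
      (((PySem.Dict.mk (PySem.List.pyGetD cur2 i [])).insert "Balance"
          (pvGet (PySem.List.pyGetD cur2 (PySem.List.pyGetD bi (-1) 0) []) "Balance")).items)
  else cur2

def pvOuter (cur : List pvTx) (p : String × List Int) : List pvTx :=
  let balance_indices := p.2.filter (fun i => pvGet (PySem.List.pyGetD cur i []) "Balance" ≠ "")
  if balance_indices ≠ [] then p.2.foldl (pvInner balance_indices) cur else cur

theorem pvDG_fold_aux (l : List (Int × pvTx)) :
    ∀ g : PySem.Dict String (List Int),
    l.foldl (fun g p => if pvGet p.2 "Date" ≠ "" then g.modify (pvGet p.2 "Date") [] (· ++ [p.1]) else g) g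
      = (l.filterMap (fun p => if pvGet p.2 "Date" ≠ "" then some (pvGet p.2 "Date", p.1) else none)).foldl
          (fun g q => g.modify q.1 [] (· ++ [q.2])) g := by
  induction l with
  | nil => intro g; rfl
  | cons p rest ih =>
    intro g
    by_cases h : pvGet p.2 "Date" ≠ ""
    · rw [List.foldl_cons, List.filterMap_cons]
      simp only [if_pos h, List.foldl_cons]
      exact ih _
    · rw [List.foldl_cons, List.filterMap_cons]
      simp only [if_neg h]
      exact ih _

theorem pvDG_eq (txs : List pvTx) :
    pvDG txs = (pvPairs txs).foldl (fun g q => g.modify q.1 [] (· ++ [q.2])) PySem.Dict.empty := by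
  unfold pvDG pvPairs
  exact pvDG_fold_aux _ _

theorem pvDG_getD (txs : List pvTx) (d : String) : (pvDG txs).getD d [] = pvGrp txs d := by
  rw [pvDG_eq, PySem.Dict.getD_foldl_modify_append]
  simp [pvGrp, PySem.Dict.getD_empty]

theorem pvDG_keys_nodup (txs : List pvTx) : (pvDG txs).keys.Nodup := by
  rw [pvDG_eq]
  exact PySem.Dict.nodup_keys_foldl_modify_key _ _ _ _ _ PySem.Dict.nodup_keys_empty

theorem pvDG_mem_keys (txs : List pvTx) (y : String) :
    y ∈ (pvDG txs).keys ↔ y ∈ (pvPairs txs).map Prod.fst := by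
  rw [pvDG_eq, PySem.Dict.keys_foldl_modify_key]
  rw [PySem.Set.mem_update]
  simp [PySem.Dict.keys_empty]

theorem pvPairs_eq (txs : List pvTx) :
    pvPairs txs = ((PySem.List.enumerate txs 0).filter (fun p => pvDate p.2 ≠ "")).map
      (fun p => (pvDate p.2, p.1)) := by
  unfold pvPairs
  induction PySem.List.enumerate txs 0 with
  | nil => rfl
  | cons p rest ih =>
    by_cases h : pvGet p.2 "Date" ≠ ""
    · simp only [List.filterMap_cons, List.filter_cons, h, if_pos]
      rw [ih]
      simp [pvDate, h]
    · simp only [List.filterMap_cons, List.filter_cons, h, if_neg]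
      rw [ih]
      simp only [ne_eq, not_not] at h
      simp [pvDate, h]

theorem pvGrp_eq (txs : List pvTx) (d : String) (hd : d ≠ "") :
    pvGrp txs d = ((PySem.List.enumerate txs 0).filter (fun p => pvDate p.2 == d)).map (·.1) := by
  unfold pvGrp
  rw [pvPairs_eq, List.filter_map, List.map_map, List.filter_filter]
  have h1 : ∀ p ∈ PySem.List.enumerate txs 0,
      (((fun q : String × Int => q.1 == d) ∘ fun p : Int × pvTx => (pvDate p.2, p.1)) p
        && decide (pvDate p.2 ≠ "")) = (pvDate p.2 == d) := by
    intro p _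
    by_cases hpd : pvDate p.2 = d
    · have : pvDate p.2 ≠ "" := by rw [hpd]; exact hd
      simp [Function.comp, hpd, this, hd]
    · simp [Function.comp, hpd]
  rw [List.filter_congr h1]
  rfl

theorem mem_pvGrp (txs : List pvTx) (d : String) (hd : d ≠ "") (i : Int) :
    i ∈ pvGrp txs d ↔ ∃ (k : Nat), ∃ (hk : k < txs.length), i = (k : Int) ∧ pvDate txs[k] = d := by
  rw [pvGrp_eq txs d hd]
  simp only [List.mem_map, List.mem_filter, PySem.List.mem_enumerate_iff]
  constructor
  · rintro ⟨p, ⟨⟨k, hk, rfl⟩, hpd⟩, rfl⟩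
    exact ⟨k, hk, by simp, by simpa using hpd⟩
  · rintro ⟨k, hk, rfl, hdk⟩
    exact ⟨((k:Int), txs[k]), ⟨⟨k, hk, by simp⟩, by simp [hdk]⟩, rfl⟩

theorem pvGrp_nodup (txs : List pvTx) (d : String) : (pvGrp txs d).Nodup := by
  by_cases hd : d = ""
  · have : (pvPairs txs).filter (fun q => q.1 == d) = [] := by
      rw [List.filter_eq_nil_iff]
      intro q hq
      rw [pvPairs_eq] at hq
      obtain ⟨p, hp, rfl⟩ := List.mem_map.1 hq
      have := (List.mem_filter.1 hp).2
      simp only [decide_eq_true_eq] at this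
      simp [hd, this]
    unfold pvGrp
    rw [this]
    simp
  · rw [pvGrp_eq txs d hd]
    have h1 := PySem.List.pairwise_lt_enumerate txs (0:Int)
    have h2 : ((PySem.List.enumerate txs 0).filter (fun p => pvDate p.2 == d)).Pairwise
        (fun p q : Int × pvTx => p.1 < q.1) := h1.filter _
    have h3 := List.Pairwise.map (f := fun p : Int × pvTx => p.1)
      (S := fun a b : Int => a < b) (fun a b h => h) h2
    exact h3.imp (fun h => ne_of_lt h)

theorem pvBi_eq (txs : List pvTx) (d : String) (hd : d ≠ "") :
    (pvGrp txs d).filter (fun i => pvGet (PySem.List.pyGetD txs i []) "Balance" ≠ "")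
      = (pvEgrp txs d).map (·.1) := by
  rw [pvGrp_eq txs d hd, List.filter_map, List.filter_filter]
  unfold pvEgrp
  refine congrArg (List.map _) ?_
  apply List.filter_congr
  intro p hp
  obtain ⟨k, hk, hpk⟩ := (PySem.List.mem_enumerate_iff _ _ _).1 hp
  subst hpk
  simp only [Function.comp, zero_add, PySem.List.pyGetD_natCast,
    List.getD_eq_getElem txs [] hk]
  by_cases h1 : pvDate txs[k] = d <;> by_cases h2 : pvBal txs[k] = "" <;>
    simp [pvMatch, pvBal, pvDate, h1, h2] at * <;> simp_all

theorem pvFilter_match (txs : List pvTx) (d : String) :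
    txs.filter (pvMatch d) = (pvEgrp txs d).map (·.2) := by
  unfold pvEgrp
  conv_lhs => rw [← PySem.List.map_snd_enumerate txs 0]
  rw [List.filter_map]
  rfl

theorem mem_pvEgrp (txs : List pvTx) (d : String) (q : Int × pvTx) (hq : q ∈ pvEgrp txs d) :
    ∃ (k : Nat), ∃ (hk : k < txs.length), q = ((k : Int), txs[k]) ∧ pvMatch d txs[k] = true := by
  unfold pvEgrp at hq
  rw [List.mem_filter] at hq
  obtain ⟨hmem, hmatch⟩ := hq
  obtain ⟨k, hk, rfl⟩ := (PySem.List.mem_enumerate_iff _ _ _).1 hmem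
  exact ⟨k, hk, by simp, by simpa using hmatch⟩

theorem pvLastBal_eq (txs : List pvTx) (d : String) :
    pvLastBal txs d = ((pvEgrp txs d).getLast?).map (fun q => pvBal q.2) := by
  unfold pvLastBal
  rw [pvFilter_match, List.getLast?_map, Option.map_map]
  rfl

theorem mem_bi (txs : List pvTx) (d : String) (i : Int)
    (h : i ∈ (pvEgrp txs d).map (·.1)) :
    ∃ (k : Nat), ∃ (hk : k < txs.length), i = (k : Int) ∧ pvMatch d txs[k] = true := by
  obtain ⟨q, hq, rfl⟩ := List.mem_map.1 h
  obtain ⟨k, hk, rfl, hm⟩ := mem_pvEgrp txs d q hq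
  exact ⟨k, hk, rfl, hm⟩

theorem bi_intro (txs : List pvTx) (d : String) (k : Nat) (hk : k < txs.length)
    (hm : pvMatch d txs[k] = true) : (k : Int) ∈ (pvEgrp txs d).map (·.1) := by
  refine List.mem_map.2 ⟨((k:Int), txs[k]), ?_, rfl⟩
  unfold pvEgrp
  rw [List.mem_filter]
  exact ⟨(PySem.List.mem_enumerate_iff _ _ _).2 ⟨k, hk, by simp⟩, hm⟩

theorem pvInner_fold (txs : List pvTx) (d : String) (hd : d ≠ "") (hne : pvEgrp txs d ≠ [])
    (l : List Int) (hsub : ∀ i ∈ l, i ∈ pvGrp txs d) (hnd : l.Nodup) :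
    ∀ (cur2 : List pvTx), cur2.length = txs.length →
    (∀ (k : Nat), k < txs.length → ((k:Int) ∈ l ∨ (k:Int) ∈ (pvEgrp txs d).map (·.1)) →
        cur2[k]? = some (txs[k]?.getD [])) →
    (l.foldl (pvInner ((pvEgrp txs d).map (·.1))) cur2).length = txs.length ∧
    ∀ (k : Nat), k < txs.length →
      (l.foldl (pvInner ((pvEgrp txs d).map (·.1))) cur2)[k]?
        = (if (k:Int) ∈ l then some (pvFill txs (txs[k]?.getD [])) else cur2[k]?) := by
  -- facts about the last balance-carrying row of the group
  have hbine : (pvEgrp txs d).map (·.1) ≠ [] := by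
    simpa using hne
  obtain ⟨m, hm, hqm, hmatchm⟩ := mem_pvEgrp txs d ((pvEgrp txs d).getLast hne)
    (List.getLast_mem hne)
  have hlastfst : PySem.List.pyGetD ((pvEgrp txs d).map (·.1)) (-1) 0 = (m : Int) := by
    refine Eq.trans (PySem.List.pyGetD_neg_one _ 0 hbine) ?_
    have h1 : ((pvEgrp txs d).map (·.1)).getLast hbine
        = ((pvEgrp txs d).getLast hne).1 := by
      have h2 := List.getLast?_map (l := pvEgrp txs d) (f := ((·.1) : Int × pvTx → Int))
      rw [List.getLast?_eq_some_getLast hbine, List.getLast?_eq_some_getLast hne] at h2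
      simpa using h2
    rw [h1, hqm]
  have hmInBi : (m : Int) ∈ (pvEgrp txs d).map (·.1) := bi_intro txs d m hm hmatchm
  have hlastbal : pvLastBal txs d = some (pvBal txs[m]) := by
    rw [pvLastBal_eq, List.getLast?_eq_some_getLast hne]
    simp [hqm]
  have hbalm : pvBal txs[m] ≠ "" := by
    simp only [pvMatch, Bool.and_eq_true, Bool.not_eq_true', beq_iff_eq] at hmatchm
    simpa using hmatchm.2
  induction l with
  | nil =>
    intro cur2 hlen hrows
    refine ⟨hlen, fun k hk => ?_⟩
    simp
  | cons i rest ih =>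
    have hsub' : ∀ j ∈ rest, j ∈ pvGrp txs d := fun j hj => hsub j (List.mem_cons_of_mem _ hj)
    have hndrest : rest.Nodup := (List.nodup_cons.1 hnd).2
    have hni : i ∉ rest := (List.nodup_cons.1 hnd).1
    intro cur2 hlen hrows
    obtain ⟨k0, hk0, rfl, hdk0⟩ := (mem_pvGrp txs d hd i).1 (hsub i (List.mem_cons_self))
    have hTxAt : txs[k0]?.getD [] = txs[k0] := by rw [List.getElem?_eq_getElem hk0]; rfl
    have hcurk0 : cur2[k0]? = some (txs[k0]?.getD []) :=
      hrows k0 hk0 (Or.inl List.mem_cons_self)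
    have hget0 : PySem.List.pyGetD cur2 ((k0:Int)) [] = txs[k0] := by
      rw [PySem.List.pyGetD_natCast, List.getD_eq_getElem?_getD, hcurk0, hTxAt]
      rfl
    rw [List.foldl_cons]
    by_cases hb0 : pvBal txs[k0] = ""
    · -- this row gets filled
      have hnotbi : ((k0:Int)) ∉ (pvEgrp txs d).map (·.1) := by
        intro hin
        obtain ⟨k', hk', hcast, hm'⟩ := mem_bi txs d _ hin
        have : k' = k0 := by exact_mod_cast hcast.symm
        subst this
        simp only [pvMatch, Bool.and_eq_true, Bool.not_eq_true', beq_iff_eq] at hm'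
        exact absurd hb0 (by simpa using hm'.2)
      have hstep : pvInner ((pvEgrp txs d).map (·.1)) cur2 ((k0:Int))
          = cur2.set k0 (((PySem.Dict.mk txs[k0]).insert "Balance" (pvBal txs[m])).items) := by
        unfold pvInner
        rw [hget0, hlastfst]
        have hgetm : PySem.List.pyGetD cur2 ((m:Int)) [] = txs[m] := by
          rw [PySem.List.pyGetD_natCast, List.getD_eq_getElem?_getD,
            hrows m hm (Or.inr hmInBi), List.getElem?_eq_getElem hm]
          rfl
        rw [if_pos ⟨hb0, hnotbi⟩, hgetm, PySem.List.pySetD_natCast]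
        rfl
      have hrowfill : (((PySem.Dict.mk txs[k0]).insert "Balance" (pvBal txs[m])).items)
          = pvFill txs (txs[k0]?.getD []) := by
        rw [hTxAt]
        unfold pvFill
        rw [if_pos ⟨hb0, by rw [hdk0]; exact hd, by rw [hdk0, hlastbal]; rfl⟩]
        rw [hdk0, hlastbal]
        rfl
      rw [hstep]
      have hlen' : (cur2.set k0 (((PySem.Dict.mk txs[k0]).insert "Balance" (pvBal txs[m])).items)).length = txs.length := by
        rw [List.length_set]; exact hlen
      have hrows' : ∀ (k : Nat), k < txs.length →
          ((k:Int) ∈ rest ∨ (k:Int) ∈ (pvEgrp txs d).map (·.1)) →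
          (cur2.set k0 (((PySem.Dict.mk txs[k0]).insert "Balance" (pvBal txs[m])).items))[k]?
            = some (txs[k]?.getD []) := by
        intro k hk hkin
        have hkne : k ≠ k0 := by
          intro h
          subst h
          rcases hkin with h | h
          · exact hni h
          · exact hnotbi h
        rw [List.getElem?_set_ne (Ne.symm hkne)]
        exact hrows k hk (hkin.elim (fun h => Or.inl (List.mem_cons_of_mem _ h)) Or.inr)
      obtain ⟨hlenr, hres⟩ := ih hsub' hndrest _ hlen' hrows'
      refine ⟨hlenr, fun k hk => ?_⟩
      rw [hres k hk]
      by_cases hkr : (k:Int) ∈ rest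
      · rw [if_pos hkr, if_pos (List.mem_cons_of_mem _ hkr)]
      · rw [if_neg hkr]
        by_cases hkk0 : k = k0
        · subst hkk0
          rw [if_pos List.mem_cons_self,
            List.getElem?_set_self (by rw [hlen]; exact hk0), hrowfill]
        · have : ¬ ((k:Int) ∈ ((k0:Int) :: rest)) := by
            intro h
            rcases List.mem_cons.1 h with h | h
            · exact hkk0 (by exact_mod_cast h)
            · exact hkr h
          rw [if_neg this, List.getElem?_set_ne (Ne.symm hkk0)]
    · -- this row keeps its balance and is left alone
      have hstep : pvInner ((pvEgrp txs d).map (·.1)) cur2 ((k0:Int)) = cur2 := by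
        unfold pvInner
        rw [hget0]
        exact if_neg (fun hc => hb0 hc.1)
      rw [hstep]
      have hrows' : ∀ (k : Nat), k < txs.length →
          ((k:Int) ∈ rest ∨ (k:Int) ∈ (pvEgrp txs d).map (·.1)) →
          cur2[k]? = some (txs[k]?.getD []) := fun k hk hkin =>
        hrows k hk (hkin.elim (fun h => Or.inl (List.mem_cons_of_mem _ h)) Or.inr)
      obtain ⟨hlenr, hres⟩ := ih hsub' hndrest cur2 hlen hrows'
      refine ⟨hlenr, fun k hk => ?_⟩
      rw [hres k hk]
      by_cases hkr : (k:Int) ∈ rest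
      · rw [if_pos hkr, if_pos (List.mem_cons_of_mem _ hkr)]
      · rw [if_neg hkr]
        by_cases hkk0 : k = k0
        · subst hkk0
          rw [if_pos List.mem_cons_self, hcurk0, hTxAt]
          have hfid : pvFill txs (txs[k]'hk) = txs[k]'hk := by
            unfold pvFill
            rw [if_neg (fun hc => hb0 hc.1)]
          rw [hfid]
        · have : ¬ ((k:Int) ∈ ((k0:Int) :: rest)) := by
            intro h
            rcases List.mem_cons.1 h with h | h
            · exact hkk0 (by exact_mod_cast h)
            · exact hkr h
          rw [if_neg this]

theorem pvOuter_fold (txs : List pvTx) (its : List (String × List Int))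
    (hmem : ∀ p ∈ its, p.1 ≠ "" ∧ p.2 = pvGrp txs p.1)
    (hnd : (its.map Prod.fst).Nodup) :
    ∀ (cur : List pvTx), cur.length = txs.length →
    (∀ (k : Nat), k < txs.length →
        cur[k]? = (if pvDate (txs[k]?.getD []) ∈ its.map Prod.fst then some (txs[k]?.getD [])
                   else some (pvFill txs (txs[k]?.getD [])))) →
    (its.foldl pvOuter cur).length = txs.length ∧
    ∀ (k : Nat), k < txs.length →
      (its.foldl pvOuter cur)[k]? = some (pvFill txs (txs[k]?.getD [])) := by
  induction its with
  | nil =>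
    intro cur hlen hrows
    refine ⟨hlen, fun k hk => ?_⟩
    have := hrows k hk
    simpa using this
  | cons p rest ih =>
    intro cur hlen hrows
    obtain ⟨hp1, hp2⟩ := hmem p List.mem_cons_self
    have hmem' : ∀ q ∈ rest, q.1 ≠ "" ∧ q.2 = pvGrp txs q.1 :=
      fun q hq => hmem q (List.mem_cons_of_mem _ hq)
    have hndrest : (rest.map Prod.fst).Nodup := (List.nodup_cons.1 (by simpa using hnd)).2
    have hp1notin : p.1 ∉ rest.map Prod.fst := (List.nodup_cons.1 (by simpa using hnd)).1
    have hdmem : p.1 ∈ (p :: rest).map Prod.fst := List.mem_map.2 ⟨p, List.mem_cons_self, rfl⟩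
    -- rows of group p.1 are still untouched, so the balance filter over cur equals the one over txs
    have hbicur : p.2.filter (fun i => pvGet (PySem.List.pyGetD cur i []) "Balance" ≠ "")
        = (pvEgrp txs p.1).map (·.1) := by
      rw [← pvBi_eq txs p.1 hp1, hp2]
      apply List.filter_congr
      intro i hi
      obtain ⟨k, hk, rfl, hdk⟩ := (mem_pvGrp txs p.1 hp1 i).1 hi
      have hTxAt : txs[k]?.getD [] = txs[k] := by rw [List.getElem?_eq_getElem hk]; rfl
      have hc : cur[k]? = some (txs[k]?.getD []) := by
        have := hrows k hk
        rwa [if_pos (by rw [hTxAt, hdk]; exact hdmem)] at this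
      have hcur : PySem.List.pyGetD cur ((k:Int)) [] = PySem.List.pyGetD txs ((k:Int)) [] := by
        rw [PySem.List.pyGetD_natCast, PySem.List.pyGetD_natCast,
          List.getD_eq_getElem?_getD, List.getD_eq_getElem?_getD, hc, hTxAt]
        rfl
      rw [hcur]
    rw [List.foldl_cons]
    by_cases hEe : pvEgrp txs p.1 = []
    · -- no balance value anywhere in this date group: the group is skipped
      have hstep : pvOuter cur p = cur := by
        simp only [pvOuter]
        rw [hbicur, hEe]
        simp
      rw [hstep]
      apply ih hmem' hndrest cur hlen
      intro k hk
      have hTxAt : txs[k]?.getD [] = txs[k] := by rw [List.getElem?_eq_getElem hk]; rfl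
      have hr := hrows k hk
      by_cases hin : pvDate (txs[k]?.getD []) ∈ rest.map Prod.fst
      · rw [if_pos hin]
        rwa [if_pos (by simpa using Or.inr (by simpa using hin))] at hr
      · rw [if_neg hin]
        by_cases hd2 : pvDate (txs[k]?.getD []) = p.1
        · rw [if_pos (by rw [hd2]; exact hdmem)] at hr
          rw [hr]
          have hnone : pvLastBal txs p.1 = none := by
            rw [pvLastBal_eq, hEe]
            rfl
          have : pvFill txs (txs[k]?.getD []) = txs[k]?.getD [] := by
            unfold pvFill
            rw [if_neg (fun hc => by rw [hd2, hnone] at hc; exact (by simpa using hc.2.2))]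
          rw [this]
        · rwa [if_neg (by
            intro hcm
            rcases List.mem_map.1 hcm with ⟨q, hq, hq2⟩
            rcases List.mem_cons.1 hq with h | h
            · exact hd2 (by rw [← hq2, h])
            · exact hin (List.mem_map.2 ⟨q, h, hq2⟩))] at hr
    · -- the group has a balance value: every row of the group gets its final value
      have hbine : (pvEgrp txs p.1).map (·.1) ≠ [] := by simpa using hEe
      have hstep : pvOuter cur p = p.2.foldl (pvInner ((pvEgrp txs p.1).map (·.1))) cur := by
        simp only [pvOuter]
        rw [hbicur, if_pos hbine]
      rw [hstep]
      have hrows2 : ∀ (k : Nat), k < txs.length →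
          ((k:Int) ∈ p.2 ∨ (k:Int) ∈ (pvEgrp txs p.1).map (·.1)) →
          cur[k]? = some (txs[k]?.getD []) := by
        intro k hk hkin
        have hTxAt : txs[k]?.getD [] = txs[k] := by rw [List.getElem?_eq_getElem hk]; rfl
        have hdk : pvDate txs[k] = p.1 := by
          rcases hkin with h | h
          · rw [hp2] at h
            obtain ⟨k', hk', hcast, hd'⟩ := (mem_pvGrp txs p.1 hp1 _).1 h
            have : k' = k := by exact_mod_cast hcast.symm
            subst this
            exact hd'
          · obtain ⟨k', hk', hcast, hm'⟩ := mem_bi txs p.1 _ h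
            have : k' = k := by exact_mod_cast hcast.symm
            subst this
            simp only [pvMatch, Bool.and_eq_true, beq_iff_eq] at hm'
            exact hm'.1
        have := hrows k hk
        rwa [if_pos (by rw [hTxAt, hdk]; exact hdmem)] at this
      obtain ⟨hlen2, hres⟩ := pvInner_fold txs p.1 hp1 hEe p.2
        (by rw [hp2]; exact fun i h => h) (by rw [hp2]; exact pvGrp_nodup txs p.1)
        cur hlen hrows2
      apply ih hmem' hndrest _ hlen2
      intro k hk
      rw [hres k hk]
      have hTxAt : txs[k]?.getD [] = txs[k] := by rw [List.getElem?_eq_getElem hk]; rfl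
      by_cases hin : pvDate (txs[k]?.getD []) ∈ rest.map Prod.fst
      · rw [if_pos hin]
        have hd2 : pvDate (txs[k]?.getD []) ≠ p.1 := fun h => hp1notin (h ▸ hin)
        have hknot : ((k:Int)) ∉ p.2 := by
          rw [hp2]
          intro hkin
          obtain ⟨k', hk', hcast, hd'⟩ := (mem_pvGrp txs p.1 hp1 _).1 hkin
          have : k' = k := by exact_mod_cast hcast.symm
          subst this
          exact hd2 (by rw [hTxAt]; exact hd')
        rw [if_neg hknot]
        have hr := hrows k hk
        rwa [if_pos (by simpa using Or.inr (by simpa using hin))] at hr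
      · rw [if_neg hin]
        by_cases hd2 : pvDate (txs[k]?.getD []) = p.1
        · rw [if_pos (by
            rw [hp2]
            exact (mem_pvGrp txs p.1 hp1 _).2 ⟨k, hk, rfl, by rw [← hTxAt]; exact hd2⟩)]
        · have hknot : ((k:Int)) ∉ p.2 := by
            rw [hp2]
            intro hkin
            obtain ⟨k', hk', hcast, hd'⟩ := (mem_pvGrp txs p.1 hp1 _).1 hkin
            have : k' = k := by exact_mod_cast hcast.symm
            subst this
            exact hd2 (by rw [hTxAt]; exact hd')
          rw [if_neg hknot]
          have hr := hrows k hk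
          rwa [if_neg (by
            intro hcm
            rcases List.mem_map.1 hcm with ⟨q, hq, hq2⟩
            rcases List.mem_cons.1 hq with h | h
            · exact hd2 (by rw [← hq2, h])
            · exact hin (List.mem_map.2 ⟨q, h, hq2⟩))] at hr

theorem pvA_eq (txs : List pvTx) (debug : Bool) :
    ensure_balance_columns txs debug = txs.map (pvFill txs) := by
  by_cases h0 : txs = []
  · simp [ensure_balance_columns, h0]
  · by_cases h1 : txs.filter (fun tx => pvGet tx "Balance" ≠ "") ≠ []
    · -- some transaction carries a balance: the grouped fold runs
      simp only [ensure_balance_columns, if_neg h0, if_pos h1]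
      show ((pvDG txs).items.foldl pvOuter txs) = txs.map (pvFill txs)
      have hmems : ∀ p ∈ (pvDG txs).items, p.1 ≠ "" ∧ p.2 = pvGrp txs p.1 := by
        intro p hp
        constructor
        · have hk1 : p.1 ∈ (pvDG txs).keys := PySem.Dict.mem_keys_of_mem_items _ hp
          have h2 := (pvDG_mem_keys txs p.1).1 hk1
          obtain ⟨q, hq, hq1⟩ := List.mem_map.1 h2
          rw [pvPairs_eq] at hq
          obtain ⟨r, hr, rfl⟩ := List.mem_map.1 hq
          have hr2 := (List.mem_filter.1 hr).2
          rw [← hq1]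
          simpa using hr2
        · have hpp : (p.1, p.2) ∈ (pvDG txs).items := by
            simpa using hp
          have := PySem.Dict.getD_of_mem_items (pvDG txs) hpp (pvDG_keys_nodup txs) []
          rw [← this, pvDG_getD]
      have hndk : ((pvDG txs).items.map Prod.fst).Nodup := by
        have := pvDG_keys_nodup txs
        simpa [PySem.Dict.keys] using this
      have hinit : ∀ (k : Nat), k < txs.length →
          (txs[k]? = (if pvDate (txs[k]?.getD []) ∈ (pvDG txs).items.map Prod.fst
            then some (txs[k]?.getD []) else some (pvFill txs (txs[k]?.getD [])))) := by
        intro k hk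
        have hTxAt : txs[k]?.getD [] = txs[k] := by rw [List.getElem?_eq_getElem hk]; rfl
        by_cases hin : pvDate (txs[k]?.getD []) ∈ (pvDG txs).items.map Prod.fst
        · rw [if_pos hin, hTxAt, List.getElem?_eq_getElem hk]
        · rw [if_neg hin]
          have hdd : pvDate (txs[k]?.getD []) = "" := by
            by_contra hne
            apply hin
            have hkeys : pvDate (txs[k]?.getD []) ∈ (pvDG txs).keys := by
              refine (pvDG_mem_keys _ _).2
                (List.mem_map.2 ⟨(pvDate txs[k], (k:Int)), ?_, by rw [hTxAt]⟩)
              rw [pvPairs_eq]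
              refine List.mem_map.2 ⟨((k:Int), txs[k]), List.mem_filter.2
                ⟨(PySem.List.mem_enumerate_iff _ _ _).2 ⟨k, hk, by simp⟩, by
                  rw [hTxAt] at hne
                  simpa using hne⟩, rfl⟩
            simpa [PySem.Dict.keys] using hkeys
          have hfill : pvFill txs (txs[k]?.getD []) = txs[k]?.getD [] := by
            unfold pvFill
            rw [if_neg (fun hc => hc.2.1 hdd)]
          rw [hfill, hTxAt, List.getElem?_eq_getElem hk]
      obtain ⟨hlenf, hresf⟩ := pvOuter_fold txs (pvDG txs).items hmems hndk txs rfl hinit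
      apply List.ext_getElem?
      intro n
      by_cases hn : n < txs.length
      · rw [hresf n hn, List.getElem?_map, List.getElem?_eq_getElem hn]
        rfl
      · have h2 : ((pvDG txs).items.foldl pvOuter txs)[n]? = none := by
          rw [List.getElem?_eq_none]
          rw [hlenf]
          omega
        have h3 : (txs.map (pvFill txs))[n]? = none := by
          rw [List.getElem?_eq_none]
          rw [List.length_map]
          omega
        rw [h2, h3]
    · -- no transaction carries a balance: A returns the list unchanged, and pvFill is the identity
      simp only [ensure_balance_columns, if_neg h0, if_neg h1]
      have hall := List.filter_eq_nil_iff.1 (not_not.1 h1)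
      have hid : ∀ tx ∈ txs, pvFill txs tx = tx := by
        intro tx htx
        have hfilter : txs.filter (pvMatch (pvDate tx)) = [] := by
          rw [List.filter_eq_nil_iff]
          intro a ha hmatch
          have hb := hall a ha
          simp only [pvMatch, Bool.and_eq_true, Bool.not_eq_true', beq_iff_eq] at hmatch
          exact absurd (by simpa using hmatch.2 : pvGet a "Balance" ≠ "") (by simpa using hb)
        unfold pvFill
        rw [if_neg (fun hc => by
          have : pvLastBal txs (pvDate tx) = none := by
            unfold pvLastBal
            rw [hfilter]
            rfl
          rw [this] at hc
          simpa using hc.2.2)]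
      exact ((List.map_congr_left hid).trans (List.map_id _)).symm

-- ===== VERDICT (by name: the statement is the Claim_ definition above) =====
theorem ensure_balance_columns_spec : Claim_equal_ensure_balance_columns := by
  intro txs debug hdom hpre
  unfold Spec_ensure_balance_columns
  rw [pvA_eq, pvB_eq]
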